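-- pv_equiv track=rewrite | github.com/Lothiard/elte-cs-bsc | 4/Cryptography and security/hazi/03-algebra.py | is_mod_ideal
-- ===== SOURCE A (Python) =====
-- def is_mod_ideal(m: int, I: set[int]) -> bool:
--     if 0 not in I:
--         return False
--
--     for a in I:
--         for b in I:
--             if (a + b) % m not in I:
--                 return False
--
--     for a in I:
--         for r in range(m):
--             if (a * r) % m not in I:
--                 return False
--     return True
-- ===== SOURCE B (Python) =====
-- def _gcd(a, b):
--     while b:
--         a, b = b, a % b
--     return abs(a)
--
--
-- def is_mod_ideal(m: int, I: set[int]) -> bool: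
--     if 0 not in I:
--         return False
--     g = m
--     for a in I:
--         g = _gcd(g, a)
--     # I is an ideal of Z/mZ iff it is exactly the multiples of g modulo m
--     return all((g * k) % m in I for k in range(abs(m) // g))
-- ===== Notes on version B (the rewrite author's own statement) =====
-- stated objective: alternative
-- what changed: Instead of testing closure with nested loops over I and over all r in range(m), B computes g = gcd of m and all elements with Euclid's algorithm and checks that 0 is in I and that every multiple of g reduced mod m lies in I (I is an ideal exactly when it is the set of reduced multiples of that gcd); Pre_ excludes only m = 0 with 0 in I, where A raises ZeroDivisionError.
import Mathlib
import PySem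

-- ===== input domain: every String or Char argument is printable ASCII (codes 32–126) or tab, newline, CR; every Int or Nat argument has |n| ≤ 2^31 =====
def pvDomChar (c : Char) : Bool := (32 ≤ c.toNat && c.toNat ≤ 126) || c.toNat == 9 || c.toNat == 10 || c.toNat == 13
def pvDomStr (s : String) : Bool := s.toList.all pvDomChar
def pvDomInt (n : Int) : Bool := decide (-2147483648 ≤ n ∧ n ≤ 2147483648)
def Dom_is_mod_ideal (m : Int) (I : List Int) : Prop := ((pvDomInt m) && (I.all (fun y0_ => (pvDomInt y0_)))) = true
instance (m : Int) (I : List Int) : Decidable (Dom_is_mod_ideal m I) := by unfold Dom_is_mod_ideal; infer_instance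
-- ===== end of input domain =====

-- B replaces A's nested closure loops by a gcd computation plus one scan of the multiples
-- of the gcd reduced mod m (objective: alternative algorithm).


-- ===== PORT A =====
def is_mod_ideal (m : Int) (I : List Int) : Bool :=
  if !(I.contains 0) then false
  else if !(I.all fun a => I.all fun b => I.contains (PySem.Int.mod (a + b) m)) then false
  else I.all fun a => (PySem.List.pyRange 0 m 1).all fun r => I.contains (PySem.Int.mod (a * r) m)

-- ===== PORT B =====
-- termination helper for the Euclid loop (cited by pyGcd's decreasing_by)
theorem pyMod_natAbs_lt (a b : Int) (hb : b ≠ 0) :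
    (PySem.Int.mod a b).natAbs < b.natAbs := by
  rcases lt_or_gt_of_ne hb with h | h
  · have := PySem.Int.mod_neg_bounds a h
    omega
  · have h1 := PySem.Int.mod_nonneg a h
    have h2 := PySem.Int.mod_lt a h
    omega

-- Source B's _gcd (Euclid's while loop with Python's %, then abs)
def pyGcd (a b : Int) : Int :=
  if hb : b = 0 then |a| else pyGcd b (PySem.Int.mod a b)
termination_by b.natAbs
decreasing_by exact pyMod_natAbs_lt a b hb

def is_mod_ideal_alt (m : Int) (I : List Int) : Bool :=
  if !(I.contains 0) then false
  else
    let g := I.foldl (fun g a => pyGcd g a) m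
    (PySem.List.pyRange 0 (PySem.Int.floordiv |m| g) 1).all fun k =>
      I.contains (PySem.Int.mod (g * k) m)

-- ===== PRECONDITION & SPEC =====
-- Pre_ excludes exactly the inputs where A raises ZeroDivisionError: m = 0 with 0 ∈ I
-- (there A reaches (0+0) % 0).
def Pre_is_mod_ideal (m : Int) (I : List Int) : Prop := ¬(m = 0 ∧ (0 : Int) ∈ I)
instance (m : Int) (I : List Int) : Decidable (Pre_is_mod_ideal m I) := by
  unfold Pre_is_mod_ideal; infer_instance

def pvWitness_is_mod_ideal : Int × List Int := (4, [0, 2])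

def Spec_is_mod_ideal (m : Int) (I : List Int) (out : Bool) : Prop := out = is_mod_ideal_alt m I
instance (m : Int) (I : List Int) (out : Bool) : Decidable (Spec_is_mod_ideal m I out) := by
  unfold Spec_is_mod_ideal; infer_instance

-- ===== CLAIM (what is proved, stated in full; the proofs are below) =====
def Claim_equal_is_mod_ideal : Prop := ∀ (m : Int) (I : List Int), Dom_is_mod_ideal m I → Pre_is_mod_ideal m I → Spec_is_mod_ideal m I (is_mod_ideal m I)

-- ===== LEMMAS AND PROOFS =====

-- m divides x - (x % m)
theorem pmod_sub_dvd (m x : Int) : m ∣ x - PySem.Int.mod x m := by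
  have h := PySem.Int.floordiv_mul_add_mod x m
  exact ⟨PySem.Int.floordiv x m, by linarith⟩

-- congruence: m ∣ x - y → x % m = y % m
theorem pmod_congr {m x y : Int} (hm : m ≠ 0) (h : m ∣ x - y) :
    PySem.Int.mod x m = PySem.Int.mod y m := by
  have hx := pmod_sub_dvd m x
  have hy := pmod_sub_dvd m y
  have hd : m ∣ PySem.Int.mod x m - PySem.Int.mod y m := by
    have he : PySem.Int.mod x m - PySem.Int.mod y m
        = (x - y) - (x - PySem.Int.mod x m) + (y - PySem.Int.mod y m) := by ring
    rw [he]; exact dvd_add (dvd_sub h hx) hy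
  have hb : (PySem.Int.mod x m - PySem.Int.mod y m).natAbs < m.natAbs := by
    rcases lt_or_gt_of_ne hm with h' | h'
    · have c1 := PySem.Int.mod_neg_bounds x h'
      have c2 := PySem.Int.mod_neg_bounds y h'
      omega
    · have c1 := PySem.Int.mod_nonneg x h'
      have c2 := PySem.Int.mod_lt x h'
      have c3 := PySem.Int.mod_nonneg y h'
      have c4 := PySem.Int.mod_lt y h'
      omega
  have := Int.eq_zero_of_dvd_of_natAbs_lt_natAbs hd hb
  omega

theorem pmod_zero (m : Int) : PySem.Int.mod 0 m = 0 := Int.zero_fmod m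

theorem pmod_of_dvd {m x : Int} (hm : m ≠ 0) (h : m ∣ x) : PySem.Int.mod x m = 0 := by
  have := pmod_congr hm (by simpa using h : m ∣ x - 0)
  rwa [pmod_zero] at this

-- pyGcd computes Int.gcd
theorem pyGcd_eq_gcd_aux : ∀ (n : Nat) (a b : Int), b.natAbs ≤ n →
    pyGcd a b = (Int.gcd a b : Int) := by
  intro n
  induction n using Nat.strong_induction_on with
  | _ n ih =>
    intro a b hn
    by_cases h : b = 0
    · subst h
      rw [pyGcd]
      simp only [Int.gcd_zero_right, dite_true]
      exact Int.abs_eq_natAbs a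
    · rw [pyGcd, dif_neg h]
      have hlt : (PySem.Int.mod a b).natAbs < b.natAbs := pyMod_natAbs_lt a b h
      rw [ih (PySem.Int.mod a b).natAbs (by omega) b (PySem.Int.mod a b) (le_refl _)]
      congr 1
      have he : PySem.Int.mod a b = a + b * (-(PySem.Int.floordiv a b)) := by
        have h := PySem.Int.floordiv_mul_add_mod a b
        linear_combination h
      rw [he, Int.gcd_add_mul_left_right, Int.gcd_comm]

theorem pyGcd_eq_gcd (a b : Int) : pyGcd a b = (Int.gcd a b : Int) :=
  pyGcd_eq_gcd_aux b.natAbs a b (le_refl _)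

-- Source B's fold computes the fold of Int.gcd
theorem foldl_pyGcd_eq (l : List Int) (s : Int) :
    l.foldl (fun g a => pyGcd g a) s = l.foldl (fun g a => (Int.gcd g a : Int)) s := by
  simp only [pyGcd_eq_gcd]

theorem foldl_gcd_dvd (l : List Int) : ∀ (s : Int),
    (l.foldl (fun g a => (Int.gcd g a : Int)) s) ∣ s ∧
    ∀ x ∈ l, (l.foldl (fun g a => (Int.gcd g a : Int)) s) ∣ x := by
  induction l with
  | nil => intro s; exact ⟨dvd_refl s, by simp⟩
  | cons a l ih =>
    intro s
    simp only [List.foldl_cons]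
    obtain ⟨h1, h2⟩ := ih ((Int.gcd s a : Int))
    refine ⟨dvd_trans h1 (Int.gcd_dvd_left s a), ?_⟩
    intro x hx
    rcases List.mem_cons.mp hx with rfl | hx
    · exact dvd_trans h1 (Int.gcd_dvd_right s x)
    · exact h2 x hx

theorem foldl_gcd_pos (l : List Int) : ∀ (s : Int), 0 < s →
    0 < l.foldl (fun g a => (Int.gcd g a : Int)) s := by
  induction l with
  | nil => intro s hs; exact hs
  | cons a l ih =>
    intro s hs
    simp only [List.foldl_cons]
    refine ih _ ?_
    have : s ≠ 0 := by omega
    exact_mod_cast Int.gcd_pos_of_ne_zero_left a this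

-- seeded from a nonzero s, the running gcd stays positive (I is nonempty in the live branch)
theorem foldl_gcd_pos_of_ne_nil (l : List Int) (s : Int) (hs : s ≠ 0) (hl : l ≠ []) :
    0 < l.foldl (fun g a => (Int.gcd g a : Int)) s := by
  obtain ⟨a, rest, rfl⟩ := List.exists_cons_of_ne_nil hl
  simp only [List.foldl_cons]
  refine foldl_gcd_pos rest _ ?_
  exact_mod_cast Int.gcd_pos_of_ne_zero_left a hs

-- ----- closure lemmas: from A's one-step closure to all gcd multiples -----

-- scalar multiples by a natural number
theorem closure_nat_mul {m : Int} {I : List Int} (hm : m ≠ 0) (h0 : (0 : Int) ∈ I)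
    (hadd : ∀ a ∈ I, ∀ b ∈ I, PySem.Int.mod (a + b) m ∈ I)
    {a : Int} (hpa : PySem.Int.mod a m ∈ I) :
    ∀ c : Nat, PySem.Int.mod ((c : Int) * a) m ∈ I := by
  intro c
  induction c with
  | zero => simpa [pmod_zero] using h0
  | succ c ih =>
    have he : PySem.Int.mod (((c : Int) + 1) * a) m
        = PySem.Int.mod (PySem.Int.mod ((c : Int) * a) m + PySem.Int.mod a m) m := by
      apply pmod_congr hm
      have d1 := pmod_sub_dvd m ((c : Int) * a)
      have d2 := pmod_sub_dvd m a
      have he2 : ((c : Int) + 1) * a - (PySem.Int.mod ((c : Int) * a) m + PySem.Int.mod a m)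
          = ((c : Int) * a - PySem.Int.mod ((c : Int) * a) m) + (a - PySem.Int.mod a m) := by
        ring
      rw [he2]; exact dvd_add d1 d2
    push_cast
    push_cast at ih
    rw [he]
    exact hadd _ ih _ hpa

-- scalar multiples by any integer
theorem closure_int_mul {m : Int} {I : List Int} (hm : m ≠ 0) (h0 : (0 : Int) ∈ I)
    (hadd : ∀ a ∈ I, ∀ b ∈ I, PySem.Int.mod (a + b) m ∈ I)
    {a : Int} (hpa : PySem.Int.mod a m ∈ I) :
    ∀ c : Int, PySem.Int.mod (c * a) m ∈ I := by
  intro c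
  have habs : |m| ≠ 0 := by simpa using hm
  have hc' : 0 ≤ c % |m| := Int.emod_nonneg c habs
  have hdvd : m ∣ c - c % |m| := by
    have : c - c % |m| = |m| * (c / |m|) := by
      rw [Int.emod_def]; ring
    rw [this]
    exact Dvd.dvd.mul_right ((dvd_abs m m).mpr (dvd_refl m)) _
  have he : PySem.Int.mod (c * a) m = PySem.Int.mod ((c % |m|) * a) m := by
    apply pmod_congr hm
    have : c * a - (c % |m|) * a = (c - c % |m|) * a := by ring
    rw [this]
    exact Dvd.dvd.mul_right hdvd a
  rw [he, ← Int.toNat_of_nonneg hc']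
  exact closure_nat_mul hm h0 hadd hpa _

-- two-term integer combinations
theorem closure_combo {m : Int} {I : List Int} (hm : m ≠ 0) (h0 : (0 : Int) ∈ I)
    (hadd : ∀ a ∈ I, ∀ b ∈ I, PySem.Int.mod (a + b) m ∈ I)
    {a b : Int} (hpa : PySem.Int.mod a m ∈ I) (hpb : PySem.Int.mod b m ∈ I)
    (u v : Int) : PySem.Int.mod (u * a + v * b) m ∈ I := by
  have hx := closure_int_mul hm h0 hadd hpa u
  have hy := closure_int_mul hm h0 hadd hpb v
  have he : PySem.Int.mod (u * a + v * b) m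
      = PySem.Int.mod (PySem.Int.mod (u * a) m + PySem.Int.mod (v * b) m) m := by
    apply pmod_congr hm
    have d1 := pmod_sub_dvd m (u * a)
    have d2 := pmod_sub_dvd m (v * b)
    have he2 : u * a + v * b - (PySem.Int.mod (u * a) m + PySem.Int.mod (v * b) m)
        = (u * a - PySem.Int.mod (u * a) m) + (v * b - PySem.Int.mod (v * b) m) := by ring
    rw [he2]; exact dvd_add d1 d2
  rw [he]
  exact hadd _ hx _ hy

-- the residue of the running gcd stays in I along the fold
theorem closure_fold {m : Int} {I : List Int} (hm : m ≠ 0) (h0 : (0 : Int) ∈ I)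
    (hadd : ∀ a ∈ I, ∀ b ∈ I, PySem.Int.mod (a + b) m ∈ I) :
    ∀ (l : List Int), (∀ x ∈ l, x ∈ I) → ∀ (s : Int), PySem.Int.mod s m ∈ I →
      PySem.Int.mod (l.foldl (fun g a => (Int.gcd g a : Int)) s) m ∈ I := by
  intro l
  induction l with
  | nil => intro _ s hs; exact hs
  | cons a l ih =>
    intro hmem s hs
    simp only [List.foldl_cons]
    have hamem : a ∈ I := hmem a (List.mem_cons_self)
    have hpa : PySem.Int.mod a m ∈ I := by
      have := hadd a hamem 0 h0
      simpa using this
    have hbez := Int.gcd_eq_gcd_ab s a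
    have hstep : PySem.Int.mod ((Int.gcd s a : Int)) m ∈ I := by
      rw [hbez]
      have hc := closure_combo hm h0 hadd hs hpa (Int.gcdA s a) (Int.gcdB s a)
      have he : s * Int.gcdA s a + a * Int.gcdB s a
          = Int.gcdA s a * s + Int.gcdB s a * a := by ring
      rw [he]
      exact hc
    exact ih (fun x hx => hmem x (List.mem_cons_of_mem a hx)) _ hstep

-- B's hypothesis (all reduced multiples of G in I) yields every reduced multiple of G
theorem B_imp {m G n : Int} {I : List Int} (hm : m ≠ 0) (hGpos : 0 < G)
    (hnG : n * G = |m|)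
    (hB : ∀ k, 0 ≤ k → k < n → PySem.Int.mod (G * k) m ∈ I) :
    ∀ x, G ∣ x → PySem.Int.mod x m ∈ I := by
  have hn : 0 < n := by nlinarith [abs_pos.mpr hm]
  rintro x ⟨t, rfl⟩
  have hn0 : n ≠ 0 := by omega
  have hk0 : 0 ≤ t % n := Int.emod_nonneg t hn0
  have hk1 : t % n < n := Int.emod_lt_of_pos t hn
  have he : PySem.Int.mod (G * t) m = PySem.Int.mod (G * (t % n)) m := by
    apply pmod_congr hm
    have h1 : G * t - G * (t % n) = |m| * (t / n) := by
      rw [Int.emod_def]; linear_combination (t / n) * hnG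
    rw [h1]
    exact Dvd.dvd.mul_right ((dvd_abs m m).mpr (dvd_refl m)) _
  rw [he]
  exact hB _ hk0 hk1

-- core equivalence for m ≠ 0, 0 ∈ I
theorem main_equiv (m : Int) (I : List Int) (hm : m ≠ 0) (h0 : (0 : Int) ∈ I) :
    is_mod_ideal m I = is_mod_ideal_alt m I := by
  set G := I.foldl (fun g a => (Int.gcd g a : Int)) m with hG
  have hGpos : 0 < G := foldl_gcd_pos_of_ne_nil I m hm (List.ne_nil_of_mem h0)
  obtain ⟨hGm, hGa⟩ := foldl_gcd_dvd I m
  rw [← hG] at hGm hGa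
  have hfold : I.foldl (fun g a => pyGcd g a) m = G := foldl_pyGcd_eq I m
  have hGabs : G ∣ |m| := (dvd_abs _ _).mpr hGm
  have hG0 : G ≠ 0 := by omega
  have hnG : PySem.Int.floordiv |m| G * G = |m| := by
    have := PySem.Int.floordiv_mul_add_mod |m| G
    rw [pmod_of_dvd hG0 hGabs] at this
    linarith
  have hA : is_mod_ideal m I = true ↔
      ((∀ a ∈ I, ∀ b ∈ I, PySem.Int.mod (a + b) m ∈ I) ∧
       (∀ a ∈ I, ∀ r ∈ PySem.List.pyRange 0 m 1, PySem.Int.mod (a * r) m ∈ I)) := by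
    simp [is_mod_ideal, List.contains_eq_mem, h0, List.all_eq_true]
  have hB : is_mod_ideal_alt m I = true ↔
      (∀ k ∈ PySem.List.pyRange 0 (PySem.Int.floordiv |m| G) 1,
        PySem.Int.mod (G * k) m ∈ I) := by
    simp only [is_mod_ideal_alt, hfold, List.contains_eq_mem, h0, decide_true, Bool.not_true,
      Bool.false_eq_true, if_false, List.all_eq_true, decide_eq_true_eq]
  rw [Bool.eq_iff_iff, hA, hB]
  constructor
  · rintro ⟨hadd, _hmul⟩
    intro k _
    have hpG : PySem.Int.mod G m ∈ I :=
      closure_fold hm h0 hadd I (fun x hx => hx) m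
        (by rw [pmod_of_dvd hm (dvd_refl m)]; exact h0)
    have := closure_int_mul hm h0 hadd hpG k
    rwa [mul_comm] at this
  · intro hall
    have himp : ∀ x, G ∣ x → PySem.Int.mod x m ∈ I := by
      refine B_imp hm hGpos hnG ?_
      intro k hk0 hk1
      exact hall k (PySem.List.mem_pyRange_one.mpr ⟨hk0, hk1⟩)
    constructor
    · intro a ha b hb
      exact himp _ (dvd_add (hGa a ha) (hGa b hb))
    · intro a ha r _
      exact himp _ (Dvd.dvd.mul_right (hGa a ha) r)

-- ===== VERDICT (by name: the statement is the Claim_ definition above) =====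
theorem is_mod_ideal_spec : Claim_equal_is_mod_ideal := by
  intro m I _hdom hpre
  unfold Spec_is_mod_ideal
  by_cases h0 : (0 : Int) ∈ I
  · have hm : m ≠ 0 := by
      intro h; exact hpre ⟨h, h0⟩
    exact main_equiv m I hm h0
  · simp [is_mod_ideal, is_mod_ideal_alt, List.contains_eq_mem, h0]
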